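-- pv_equiv track=rewrite | github.com/Seth2881/python-course | course/cesar_coding.py | cesar_coding
-- ===== SOURCE A (Python) =====
-- def cesar_coding(nbr:int)->str :
--     '''
--     Generate the "rolled" alphabet that is used to encode a prompt
--     '''
--     alphabet_cesar = ''
--     for i in range(1,27) :
--         if (i+nbr)%26+96 == 96:
--             alphabet_cesar+='z'
--         else :
--             alphabet_cesar+=chr((i+nbr)%26+96)
--
--     return alphabet_cesar
-- ===== SOURCE B (Python) =====
-- def cesar_coding(nbr: int) -> str:
--     '''
--     Generate the "rolled" alphabet that is used to encode a prompt
--     '''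
--     alpha = 'abcdefghijklmnopqrstuvwxyz'
--     s = nbr % 26
--     return alpha[s:] + alpha[:s]
-- ===== Notes on version B (the rewrite author's own statement) =====
-- stated objective: simpler
-- what changed: Replaced the per-letter loop with its residue-zero special case by a closed-form string rotation: alpha[s:]+alpha[:s] with s the shift reduced modulo the alphabet length.
import Mathlib
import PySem

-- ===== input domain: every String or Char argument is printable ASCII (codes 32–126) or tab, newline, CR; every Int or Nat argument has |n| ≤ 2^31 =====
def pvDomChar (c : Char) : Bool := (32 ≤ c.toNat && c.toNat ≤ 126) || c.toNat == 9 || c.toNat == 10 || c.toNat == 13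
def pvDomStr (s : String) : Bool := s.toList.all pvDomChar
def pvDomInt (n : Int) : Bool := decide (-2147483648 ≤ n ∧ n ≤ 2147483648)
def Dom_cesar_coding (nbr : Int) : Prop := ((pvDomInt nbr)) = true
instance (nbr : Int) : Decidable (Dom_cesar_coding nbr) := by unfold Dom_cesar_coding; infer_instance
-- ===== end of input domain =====

-- ===== PORT A =====
-- header: B replaces A's per-letter loop by a closed-form rotation of the alphabet (simpler); return values are equal for every int.
def cesar_coding (nbr : Int) : String :=
  String.ofList ((PySem.List.pyRange 1 27 1).foldl (fun acc i =>
    if PySem.Int.mod (i + nbr) 26 + 96 == 96 then acc ++ ['z']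
    else acc ++ [Char.ofNat (PySem.Int.mod (i + nbr) 26 + 96).toNat]) [])

-- ===== PORT B =====
def cesar_coding_alt (nbr : Int) : String :=
  let alpha : List Char := "abcdefghijklmnopqrstuvwxyz".toList
  let s := PySem.Int.mod nbr 26
  String.ofList (PySem.List.slice alpha (some s) none ++ PySem.List.slice alpha none (some s))

-- ===== PRECONDITION & SPEC =====
def Spec_cesar_coding (nbr : Int) (out : String) : Prop := out = cesar_coding_alt nbr
instance (nbr : Int) (out : String) : Decidable (Spec_cesar_coding nbr out) := by unfold Spec_cesar_coding; infer_instance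

-- ===== CLAIM (what is proved, stated in full; the proofs are below) =====
def Claim_equal_cesar_coding : Prop := ∀ (nbr : Int), Dom_cesar_coding nbr → Spec_cesar_coding nbr (cesar_coding nbr)

-- ===== LEMMAS AND PROOFS =====
theorem cesar_mod_idem (nbr : Int) : PySem.Int.mod (PySem.Int.mod nbr 26) 26 = PySem.Int.mod nbr 26 := by
  simp only [PySem.Int.mod_eq_emod_of_pos (by norm_num : (0:Int) < 26)]
  omega

theorem cesar_A_reduce (nbr : Int) : cesar_coding nbr = cesar_coding (PySem.Int.mod nbr 26) := by
  unfold cesar_coding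
  congr 1
  congr 1
  funext acc i
  have h : PySem.Int.mod (i + nbr) 26 = PySem.Int.mod (i + PySem.Int.mod nbr 26) 26 := by
    simp only [PySem.Int.mod_eq_emod_of_pos (by norm_num : (0:Int) < 26)]
    omega
  rw [h]

theorem cesar_B_reduce (nbr : Int) : cesar_coding_alt nbr = cesar_coding_alt (PySem.Int.mod nbr 26) := by
  unfold cesar_coding_alt
  rw [cesar_mod_idem]

-- ===== VERDICT (by name: the statement is the Claim_ definition above) =====
theorem cesar_coding_spec : Claim_equal_cesar_coding := by
  intro nbr _
  unfold Spec_cesar_coding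
  rw [cesar_A_reduce, cesar_B_reduce]
  have h0 : 0 ≤ PySem.Int.mod nbr 26 := PySem.Int.mod_nonneg _ (by norm_num)
  have h1 : PySem.Int.mod nbr 26 < 26 := PySem.Int.mod_lt _ (by norm_num)
  set m := PySem.Int.mod nbr 26 with hm
  clear_value m
  interval_cases m <;> decide
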